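-- pv_equiv track=rewrite | github.com/brubsby/oeis_py | sequences/A291633.py | count_zero_groups
-- ===== SOURCE A (Python) =====
-- def count_zero_groups(numbers, lookup):
--     zero_groups_count = {}
--     for number in numbers:
--         for group in lookup[number].split("1"):
--             count = len(group)
--             if count > 0:
--                 zero_groups_count[count] = 1 + (zero_groups_count.get(count) or 0)
--     return zero_groups_count
-- ===== SOURCE B (Python) =====
-- def count_zero_groups(numbers, lookup):
--     zero_groups_count = {}
--     for number in numbers:
--         run = 0
--         for ch in lookup[number]:
--             if ch == "1":
--                 if run > 0:
--                     zero_groups_count[run] = 1 + (zero_groups_count.get(run) or 0)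
--                 run = 0
--             else:
--                 run += 1
--         if run > 0:
--             zero_groups_count[run] = 1 + (zero_groups_count.get(run) or 0)
--     return zero_groups_count
-- ===== Notes on version B (the rewrite author's own statement) =====
-- stated objective: alternative
-- what changed: Replaces the per-string split("1") + per-group length counting with a single left-to-right character scan that maintains a run-length accumulator and flushes it into the dict at each '1' and at end of string, so no intermediate group lists are built.
import Mathlib
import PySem

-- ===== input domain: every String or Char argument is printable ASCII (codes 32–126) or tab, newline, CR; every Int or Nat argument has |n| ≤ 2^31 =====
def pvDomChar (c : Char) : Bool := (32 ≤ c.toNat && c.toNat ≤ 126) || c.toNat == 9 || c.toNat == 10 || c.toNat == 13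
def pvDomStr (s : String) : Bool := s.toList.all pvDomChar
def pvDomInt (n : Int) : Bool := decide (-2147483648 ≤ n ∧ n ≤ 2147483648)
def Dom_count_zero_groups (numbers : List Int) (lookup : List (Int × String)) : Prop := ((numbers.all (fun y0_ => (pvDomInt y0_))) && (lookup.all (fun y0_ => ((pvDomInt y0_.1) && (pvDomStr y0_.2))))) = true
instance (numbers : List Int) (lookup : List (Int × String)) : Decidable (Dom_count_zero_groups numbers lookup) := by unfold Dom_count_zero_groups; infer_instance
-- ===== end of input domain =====

-- B replaces the split("1")-based per-string counting by a single character scan with a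
-- run-length accumulator (same dict updates, no intermediate group lists); alternative, not faster.


-- ===== PORT A =====
-- Python's `x or 0` on an Optional[int]: None and 0 both give 0
def czgOr0 (o : Option Int) : Int :=
  match o with
  | some v => if v = 0 then 0 else v
  | none => 0

-- inner loop of A: for group in s.split("1"): …  (sep "1" is nonempty, so split is Chars.splitOn)
def czgInnerA (d : PySem.Dict Int Int) (s : String) : PySem.Dict Int Int :=
  (PySem.Chars.splitOn s.toList ['1']).foldl
    (fun d group =>
      let count : Int := (group.length : Int)
      if count > 0 then d.insert count (1 + czgOr0 (d.get? count)) else d) d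

def count_zero_groups (numbers : List Int) (lookup : List (Int × String)) : List (Int × Int) :=
  (numbers.foldl
    (fun d number =>
      match (PySem.Dict.ofList lookup).get? number with
      | some s => czgInnerA d s
      | none => d)   -- KeyError in Python; excluded by Pre_
    PySem.Dict.empty).items

-- ===== PORT B =====
-- the dict-update expression shared by Source B's two flush sites
def czgRecord (d : PySem.Dict Int Int) (run : Int) : PySem.Dict Int Int :=
  d.insert run (1 + czgOr0 (d.get? run))

-- inner loop of B: one scan over the characters with a run-length accumulator, flushed at '1' and at the end
def czgInnerB (d : PySem.Dict Int Int) (s : String) : PySem.Dict Int Int :=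
  let st := s.toList.foldl
    (fun (p : PySem.Dict Int Int × Int) ch =>
      if ch = '1' then ((if p.2 > 0 then czgRecord p.1 p.2 else p.1), 0)
      else (p.1, p.2 + 1)) (d, 0)
  if st.2 > 0 then czgRecord st.1 st.2 else st.1

def count_zero_groups_alt (numbers : List Int) (lookup : List (Int × String)) : List (Int × Int) :=
  (numbers.foldl
    (fun d number =>
      match (PySem.Dict.ofList lookup).get? number with
      | some s => czgInnerB d s
      | none => d)   -- KeyError in Python; excluded by Pre_
    PySem.Dict.empty).items

-- ===== PRECONDITION & SPEC =====
-- A raises KeyError when some number is not a key of lookup; exactly those inputs are excluded.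
def Pre_count_zero_groups (numbers : List Int) (lookup : List (Int × String)) : Prop :=
  (numbers.all (fun n => (PySem.Dict.ofList lookup).contains n)) = true
instance (numbers : List Int) (lookup : List (Int × String)) : Decidable (Pre_count_zero_groups numbers lookup) := by unfold Pre_count_zero_groups; infer_instance

def pvWitness_count_zero_groups : List Int × (List (Int × String)) :=
  ([0, 1, 0], [(0, "00100"), (1, "0110a0")])

def Spec_count_zero_groups (numbers : List Int) (lookup : List (Int × String)) (out : List (Int × Int)) : Prop := out = count_zero_groups_alt numbers lookup
instance (numbers : List Int) (lookup : List (Int × String)) (out : List (Int × Int)) : Decidable (Spec_count_zero_groups numbers lookup out) := by unfold Spec_count_zero_groups; infer_instance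

-- ===== CLAIM (what is proved, stated in full; the proofs are below) =====
def Claim_equal_count_zero_groups : Prop := ∀ (numbers : List Int) (lookup : List (Int × String)), Dom_count_zero_groups numbers lookup → Pre_count_zero_groups numbers lookup → Spec_count_zero_groups numbers lookup (count_zero_groups numbers lookup)

-- ===== LEMMAS AND PROOFS =====

-- structural recursion equal to splitOn · ['1']
def mySplit : List Char → List (List Char)
  | [] => [[]]
  | c :: t =>
    if c = '1' then [] :: mySplit t
    else
      match mySplit t with
      | g :: gs => (c :: g) :: gs
      | [] => [[c]]

theorem mySplit_ne_nil (l : List Char) : mySplit l ≠ [] := by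
  cases l with
  | nil => simp [mySplit]
  | cons c t =>
    simp only [mySplit]
    split
    · simp
    · split <;> simp

def consFirst (p : List Char) : List (List Char) → List (List Char)
  | g :: gs => (p ++ g) :: gs
  | [] => [p]

theorem splitOn_go_eq (l : List Char) : ∀ (fuel : Nat) (cur : List Char) (acc : List (List Char)),
    l.length < fuel →
    PySem.Chars.splitOn.go ['1'] fuel l cur acc = acc.reverse ++ consFirst cur.reverse (mySplit l) := by
  induction l with
  | nil =>
    intro fuel cur acc h
    obtain ⟨f, rfl⟩ : ∃ f, fuel = f + 1 := ⟨fuel - 1, by omega⟩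
    simp [PySem.Chars.splitOn.go, mySplit, consFirst]
  | cons c t ih =>
    intro fuel cur acc h
    obtain ⟨fuel, rfl⟩ : ∃ f, fuel = f + 1 := ⟨fuel - 1, by omega⟩
    by_cases hc : c = '1'
    · subst hc
      rw [show PySem.Chars.splitOn.go ['1'] (fuel + 1) ('1' :: t) cur acc
            = PySem.Chars.splitOn.go ['1'] fuel t [] (cur.reverse :: acc) by
          rw [PySem.Chars.splitOn.go]; simp [List.isPrefixOf]]
      rw [ih fuel [] (cur.reverse :: acc) (by simp only [List.length_cons] at h; omega)]
      rcases hne : mySplit t with _ | ⟨g, gs⟩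
      · exact absurd hne (mySplit_ne_nil t)
      · simp [mySplit, consFirst, hne]
    · rw [show PySem.Chars.splitOn.go ['1'] (fuel + 1) (c :: t) cur acc
            = PySem.Chars.splitOn.go ['1'] fuel t (c :: cur) acc by
          rw [PySem.Chars.splitOn.go]; simp [List.isPrefixOf, Ne.symm hc]]
      rw [ih fuel (c :: cur) acc (by simp only [List.length_cons] at h; omega)]
      rcases hne : mySplit t with _ | ⟨g, gs⟩
      · exact absurd hne (mySplit_ne_nil t)
      · simp [mySplit, consFirst, hne, hc]

theorem splitOn_eq_mySplit (l : List Char) : PySem.Chars.splitOn l ['1'] = mySplit l := by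
  rw [PySem.Chars.splitOn, splitOn_go_eq l (l.length + 1) [] [] (by omega)]
  rcases hne : mySplit l with _ | ⟨g, gs⟩
  · exact absurd hne (mySplit_ne_nil l)
  · simp [consFirst]

-- fold of A's per-group body over a list of group lengths
def procLens (d : PySem.Dict Int Int) (ns : List Int) : PySem.Dict Int Int :=
  ns.foldl (fun d n => if n > 0 then czgRecord d n else d) d

def addFirst (r : Int) : List Int → List Int
  | n :: ns => (r + n) :: ns
  | [] => [r]

theorem innerA_eq_procLens (d : PySem.Dict Int Int) (s : String) :
    czgInnerA d s = procLens d ((mySplit s.toList).map (fun g => (g.length : Int))) := by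
  simp [czgInnerA, procLens, splitOn_eq_mySplit, List.foldl_map, czgRecord]

theorem scan_eq_procLens (l : List Char) : ∀ (d : PySem.Dict Int Int) (run : Int), 0 ≤ run →
    (let st := l.foldl
        (fun (p : PySem.Dict Int Int × Int) ch =>
          if ch = '1' then ((if p.2 > 0 then czgRecord p.1 p.2 else p.1), 0)
          else (p.1, p.2 + 1)) (d, run)
     if st.2 > 0 then czgRecord st.1 st.2 else st.1)
    = procLens d (addFirst run ((mySplit l).map (fun g => (g.length : Int)))) := by
  induction l with
  | nil =>
    intro d run _
    simp [mySplit, addFirst, procLens]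
  | cons c t ih =>
    intro d run hrun
    by_cases hc : c = '1'
    · subst hc
      simp only [List.foldl_cons, reduceIte]
      rw [ih (if run > 0 then czgRecord d run else d) 0 le_rfl]
      rcases hne : mySplit t with _ | ⟨g, gs⟩
      · exact absurd hne (mySplit_ne_nil t)
      · simp [mySplit, hne, addFirst, procLens]
    · simp only [List.foldl_cons, if_neg hc]
      rw [ih d (run + 1) (by omega)]
      rcases hne : mySplit t with _ | ⟨g, gs⟩
      · exact absurd hne (mySplit_ne_nil t)
      · simp only [mySplit, if_neg hc, hne, List.map_cons, addFirst]
        congr 1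
        push_cast [List.length_cons]
        ring

theorem innerB_eq_innerA (d : PySem.Dict Int Int) (s : String) :
    czgInnerB d s = czgInnerA d s := by
  rw [innerA_eq_procLens, czgInnerB, scan_eq_procLens s.toList d 0 le_rfl]
  rcases hne : mySplit s.toList with _ | ⟨g, gs⟩
  · exact absurd hne (mySplit_ne_nil s.toList)
  · simp [addFirst]

-- ===== VERDICT (by name: the statement is the Claim_ definition above) =====
theorem count_zero_groups_spec : Claim_equal_count_zero_groups := by
  intro numbers lookup _ _
  unfold Spec_count_zero_groups count_zero_groups count_zero_groups_alt
  congr 1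
  apply List.foldl_ext
  intro d n _
  cases (PySem.Dict.ofList lookup).get? n with
  | none => rfl
  | some s => exact (innerB_eq_innerA d s).symm
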